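-- pv_equiv track=rewrite | github.com/wonaya/covid_workflow | scripts/MSA_ORF_Boundaries_mpi.py | orf_boundaries
-- ===== SOURCE A (Python) =====
-- Stop = ['TAA','taa', 'TAG', 'tag', 'TGA', 'tga']
--
-- def find_locs(mylist,mystring):
--     v1 = [i for i,x in enumerate(mylist) if x == mystring]
--     return(v1)
--
-- def find_all_locs(mylist, list_of_strings):
--     v1 = [i for i,x in enumerate(mylist) if x in list_of_strings]
--     return(v1)
--
-- def first_larger_element(my_list, to_compare):
--     if(max(my_list) > to_compare):
--         return(next(x[0] for x in enumerate(my_list) if x[1] > to_compare))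
--     else:
--         pass
--
-- def orf_boundaries(codon_list):
--     orf_starts = find_locs(codon_list, 'ATG')
--     orf_stops = find_all_locs(codon_list, Stop)
--     start_stop = []
--     stop_list = []
--     for posit in orf_starts:
--         temp_ind = first_larger_element(orf_stops,posit)
--         if type(temp_ind) is int:
--             temp_stop = orf_stops[temp_ind]
--             stop_list = stop_list + [temp_stop]
--             start_stop = start_stop + [[posit, temp_stop, temp_stop-posit]]
--         else:
--             pass
--     stop_list = sorted(list(set(stop_list)))
--     final_orf_boundaries = []
--     for stops in stop_list:
--         pos_stops_temp = [i for i,x in enumerate(start_stop) if x[1]== stops][0]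
--         final_orf_boundaries = final_orf_boundaries + [start_stop[pos_stops_temp]]
--     return(final_orf_boundaries)
-- ===== SOURCE B (Python) =====
-- _STOPS = frozenset(['TAA', 'taa', 'TAG', 'tag', 'TGA', 'tga'])
--
-- def orf_boundaries(codon_list):
--     out = []
--     pending = None  # earliest unmatched 'ATG' position since the last stop codon
--     for i, codon in enumerate(codon_list):
--         if codon in _STOPS:
--             if pending is not None:
--                 out.append([pending, i, i - pending])
--                 pending = None
--         elif codon == 'ATG' and pending is None:
--             pending = i
--     return out
-- ===== Notes on version B (the rewrite author's own statement) =====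
-- stated objective: faster
-- what changed: Replaced A's pipeline (per-start linear scan of the stop list via max+next, then sorted(set(...)) and a per-stop linear re-scan of start_stop) by a single left-to-right pass that keeps the earliest unmatched 'ATG' position and emits [start, stop, stop-start] at each stop codon.
import Mathlib
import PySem

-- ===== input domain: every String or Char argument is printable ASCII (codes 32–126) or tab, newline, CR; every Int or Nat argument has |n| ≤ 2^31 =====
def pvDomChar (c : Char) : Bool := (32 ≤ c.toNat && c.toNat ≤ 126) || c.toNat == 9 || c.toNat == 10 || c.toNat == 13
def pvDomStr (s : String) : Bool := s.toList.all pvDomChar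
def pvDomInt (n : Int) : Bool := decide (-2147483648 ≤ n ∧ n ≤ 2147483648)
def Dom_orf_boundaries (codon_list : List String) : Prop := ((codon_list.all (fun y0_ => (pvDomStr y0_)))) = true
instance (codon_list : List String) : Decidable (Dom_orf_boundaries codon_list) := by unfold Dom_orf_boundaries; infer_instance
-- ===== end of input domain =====

-- B replaces A's quadratic multi-pass pipeline by a single left-to-right pass
-- (earliest unmatched 'ATG' since the last stop codon); equal on all inputs where A returns.


-- ===== PORT A =====
def pvStop : List String := ["TAA", "taa", "TAG", "tag", "TGA", "tga"]

def find_locs (mylist : List String) (mystring : String) : List Int :=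
  (PySem.List.enumerate mylist).filterMap (fun ix => if ix.2 = mystring then some ix.1 else none)

def find_all_locs (mylist : List String) (list_of_strings : List String) : List Int :=
  (PySem.List.enumerate mylist).filterMap (fun ix => if ix.2 ∈ list_of_strings then some ix.1 else none)

-- Python raises ValueError on max([]): the port returns none there (such inputs are outside Pre_)
def first_larger_element (my_list : List Int) (to_compare : Int) : Option Int :=
  match PySem.List.max? my_list (fun y => y) with
  | none => none
  | some m =>
      if m > to_compare then
        ((PySem.List.enumerate my_list).find? (fun x => decide (to_compare < x.2))).map (·.1)
      else none

def orf_boundaries (codon_list : List String) : List (List Int) :=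
  let orf_starts := find_locs codon_list "ATG"
  let orf_stops := find_all_locs codon_list pvStop
  let st := orf_starts.foldl (fun (st : List (List Int) × List Int) posit =>
      match first_larger_element orf_stops posit with
      | some temp_ind =>
          let temp_stop := (PySem.List.pyGet? orf_stops temp_ind).getD 0
          (st.1 ++ [[posit, temp_stop, temp_stop - posit]], st.2 ++ [temp_stop])
      | none => st) ([], [])
  let start_stop := st.1
  let stop_list := PySem.List.sorted (PySem.Set.ofList st.2) (fun x => x) false
  stop_list.foldl (fun fin stops =>
      match ((PySem.List.enumerate start_stop).filter
              (fun ix => PySem.List.pyGet? ix.2 1 == some stops)).head? with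
      | some p => fin ++ [(PySem.List.pyGet? start_stop p.1).getD []]
      | none => fin)   -- unreachable: Python's [..][0] would raise IndexError
    []

-- ===== PORT B =====
def orf_boundaries_alt (codon_list : List String) : List (List Int) :=
  ((PySem.List.enumerate codon_list).foldl
    (fun (st : List (List Int) × Option Int) ic =>
      if ic.2 ∈ pvStop then
        match st.2 with
        | some p => (st.1 ++ [[p, ic.1, ic.1 - p]], none)
        | none => st
      else if ic.2 = "ATG" ∧ st.2 = none then (st.1, some ic.1)
      else st)
    ([], none)).1

-- ===== PRECONDITION & SPEC =====
-- Pre_ excludes exactly the inputs on which Python A raises ValueError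
-- (an 'ATG' present but no stop codon: max() of the empty stop list).
def Pre_orf_boundaries (codon_list : List String) : Prop :=
  "ATG" ∈ codon_list → ∃ c ∈ codon_list, c ∈ pvStop
instance (codon_list : List String) : Decidable (Pre_orf_boundaries codon_list) := by
  unfold Pre_orf_boundaries; infer_instance

def pvWitness_orf_boundaries : List String := ["ATG", "TAA"]

def Spec_orf_boundaries (codon_list : List String) (out : List (List Int)) : Prop :=
  out = orf_boundaries_alt codon_list
instance (codon_list : List String) (out : List (List Int)) : Decidable (Spec_orf_boundaries codon_list out) := by
  unfold Spec_orf_boundaries; infer_instance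

-- ===== CLAIM (what is proved, stated in full; the proofs are below) =====
def Claim_equal_orf_boundaries : Prop := ∀ (codon_list : List String), Dom_orf_boundaries codon_list → Pre_orf_boundaries codon_list → Spec_orf_boundaries codon_list (orf_boundaries codon_list)


-- ===== LEMMAS AND PROOFS =====

lemma enum_ge {α : Type} (l : List α) : ∀ (k : Int) (x : Int × α), x ∈ PySem.List.enumerate l k → k ≤ x.1 := by
  induction l with
  | nil => intro k x hx; simp [PySem.List.enumerate] at hx
  | cons a t ih =>
    intro k x hx
    rw [PySem.List.enumerate_cons] at hx
    rw [List.mem_cons] at hx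
    rcases hx with hx | hx
    · simp [hx]
    · have := ih (k+1) x hx; omega

lemma enum_find_snd {α : Type} (l : List α) (q : α → Bool) : ∀ (k : Int),
    ((PySem.List.enumerate l k).find? (fun x => q x.2)).map (·.2) = l.find? q := by
  induction l with
  | nil => intro k; simp [PySem.List.enumerate]
  | cons a t ih =>
    intro k
    rw [PySem.List.enumerate_cons]
    by_cases h : q a
    · simp [h]
    · simp only [List.find?_cons, h]
      simpa [h] using ih (k+1)

lemma enum_get {α : Type} (l : List α) : ∀ (k : Int) (x : Int × α), x ∈ PySem.List.enumerate l k →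
    PySem.List.pyGet? l (x.1 - k) = some x.2 := by
  induction l with
  | nil => intro k x hx; simp [PySem.List.enumerate] at hx
  | cons a t ih =>
    intro k x hx
    rw [PySem.List.enumerate_cons] at hx
    rw [List.mem_cons] at hx
    rcases hx with hx | hx
    · subst hx
      simp only [Int.sub_self]
      have h0 : ((0 : Nat) : Int) = (0 : Int) := by norm_num
      rw [← h0, PySem.List.pyGet?_natCast]
      rfl
    · have hge := enum_ge t (k+1) x hx
      have := ih (k+1) x hx
      have hj : ∃ j : Nat, x.1 - (k+1) = (j : Int) := ⟨(x.1 - (k+1)).toNat, by omega⟩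
      obtain ⟨j, hjeq⟩ := hj
      have h1 : x.1 - k = ((j+1 : Nat) : Int) := by push_cast; omega
      rw [h1, PySem.List.pyGet?_natCast]
      rw [hjeq, PySem.List.pyGet?_natCast] at this
      simpa using this

lemma fle_char (l : List Int) (p : Int) :
    (first_larger_element l p).map (fun i => (PySem.List.pyGet? l i).getD 0)
      = l.find? (fun s => decide (p < s)) := by
  unfold first_larger_element
  cases hm : PySem.List.max? l (fun y => y) with
  | none =>
    have : l = [] := (PySem.List.max?_eq_none_iff l _).mp hm
    subst this; simp
  | some m =>
    by_cases hmp : m > p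
    · simp only [hmp, if_pos]
      cases hf : (PySem.List.enumerate l 0).find? (fun x => decide (p < x.2)) with
      | none =>
        have := enum_find_snd l (fun s => decide (p < s)) 0
        rw [hf] at this
        simp at this ⊢
        exact this.symm ▸ rfl
      | some x =>
        have hsnd := enum_find_snd l (fun s => decide (p < s)) 0
        rw [hf] at hsnd
        have hmem : x ∈ PySem.List.enumerate l 0 := List.mem_of_find?_eq_some hf
        have hget := enum_get l 0 x hmem
        simp only [Int.sub_zero] at hget
        simp only [Option.map_some, ← hsnd]
        rw [hget]
        rfl
    · dsimp only
      rw [if_neg hmp]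
      symm
      simp only [Option.map_none]
      rw [List.find?_eq_none]
      intro s hs
      have := PySem.List.max?_isMax hm s hs
      simp only [decide_eq_true_eq]
      omega

def pvTri (e : Int × Int) : List Int := [e.1, e.2, e.2 - e.1]

def pairsPS (starts stops : List Int) : List (Int × Int) :=
  starts.filterMap (fun p => (stops.find? (fun s => decide (p < s))).map (fun s => (p, s)))

def goPS : Option Int → List (Int × Int) → List (Int × Int)
  | _, [] => []
  | last, (p, s) :: r => if some s = last then goPS last r else (p, s) :: goPS (some s) r

def RPS (pending : Option Int) (k : Int) : List String → List (Int × Int)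
  | [] => []
  | c :: l =>
    if c ∈ pvStop then
      (match pending with | some p => [(p, k)] | none => []) ++ RPS none (k + 1) l
    else if c = "ATG" then
      (match pending with | some _ => RPS pending (k + 1) l | none => RPS (some k) (k + 1) l)
    else RPS pending (k + 1) l

def startsF (k : Int) (l : List String) : List Int :=
  (PySem.List.enumerate l k).filterMap (fun ix => if ix.2 = "ATG" then some ix.1 else none)

def stopsF (k : Int) (l : List String) : List Int :=
  (PySem.List.enumerate l k).filterMap (fun ix => if ix.2 ∈ pvStop then some ix.1 else none)

lemma pairsPS_cons (p : Int) (starts stops : List Int) :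
    pairsPS (p :: starts) stops
      = ((stops.find? (fun s => decide (p < s))).map (fun s => (p, s))).toList ++ pairsPS starts stops := by
  cases h : stops.find? (fun s => decide (p < s)) <;> simp [pairsPS, h]

lemma fold1 (stops : List Int) : ∀ (starts : List Int) (acc1 : List (List Int)) (acc2 : List Int),
    starts.foldl (fun (st : List (List Int) × List Int) posit =>
      match first_larger_element stops posit with
      | some temp_ind =>
          let temp_stop := (PySem.List.pyGet? stops temp_ind).getD 0
          (st.1 ++ [[posit, temp_stop, temp_stop - posit]], st.2 ++ [temp_stop])
      | none => st) (acc1, acc2)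
    = (acc1 ++ (pairsPS starts stops).map pvTri, acc2 ++ (pairsPS starts stops).map (·.2)) := by
  intro starts
  induction starts with
  | nil => intro acc1 acc2; simp [pairsPS]
  | cons p t ih =>
    intro acc1 acc2
    rw [List.foldl_cons]
    have hc := fle_char stops p
    cases hf : first_larger_element stops p with
    | none =>
      rw [hf] at hc
      simp only [Option.map_none] at hc
      rw [ih, pairsPS_cons, ← hc]
      simp
    | some ti =>
      rw [hf] at hc
      simp only [Option.map_some] at hc
      rw [ih, pairsPS_cons, ← hc]
      simp [pvTri]

lemma phase3 (es : List (Int × Int)) (SL : List Int) :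
    SL.foldl (fun fin stops =>
      match ((PySem.List.enumerate (es.map pvTri)).filter
              (fun ix => PySem.List.pyGet? ix.2 1 == some stops)).head? with
      | some p => fin ++ [(PySem.List.pyGet? (es.map pvTri) p.1).getD []]
      | none => fin) []
    = SL.flatMap (fun s => ((es.find? (fun e => e.2 == s)).map pvTri).toList) := by
  have hfind : ∀ s : Int, (es.map pvTri).find? (fun x => PySem.List.pyGet? x 1 == some s)
      = (es.find? (fun e => e.2 == s)).map pvTri := by
    intro s
    rw [List.find?_map]
    rfl
  have hbody : ∀ (fin : List (List Int)) (s : Int),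
      (match ((PySem.List.enumerate (es.map pvTri)).filter
              (fun ix => PySem.List.pyGet? ix.2 1 == some s)).head? with
       | some p => fin ++ [(PySem.List.pyGet? (es.map pvTri) p.1).getD []]
       | none => fin)
      = fin ++ ((es.find? (fun e => e.2 == s)).map pvTri).toList := by
    intro fin s
    rw [List.head?_filter]
    cases hx : (PySem.List.enumerate (es.map pvTri)).find? (fun ix => PySem.List.pyGet? ix.2 1 == some s) with
    | none =>
      have h2 := enum_find_snd (es.map pvTri) (fun x => PySem.List.pyGet? x 1 == some s) 0
      rw [hx] at h2
      simp only [Option.map_none] at h2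
      rw [hfind s] at h2
      cases he : es.find? (fun e => e.2 == s) with
      | none => simp
      | some e => rw [he] at h2; simp at h2
    | some x =>
      have h2 := enum_find_snd (es.map pvTri) (fun x => PySem.List.pyGet? x 1 == some s) 0
      rw [hx] at h2
      simp only [Option.map_some] at h2
      rw [hfind s] at h2
      have hget := enum_get (es.map pvTri) 0 x (List.mem_of_find?_eq_some hx)
      simp only [Int.sub_zero] at hget
      dsimp only
      rw [hget]
      cases he : es.find? (fun e => e.2 == s) with
      | none => rw [he] at h2; simp at h2
      | some e =>
        rw [he] at h2
        simp only [Option.map_some, Option.some.injEq] at h2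
        simp [h2]
  rw [PySem.List.foldl_congr_mem SL _ (fun fin s => fin ++ ((es.find? (fun e => e.2 == s)).map pvTri).toList) [] (by intro acc x _; exact hbody acc x)]
  rw [PySem.List.foldl_append_eq_flatMap]
  simp

lemma ofList_sublist {α : Type} [BEq α] [LawfulBEq α] : ∀ (xs : List α), (PySem.Set.ofList xs).Sublist xs := by
  intro xs
  induction xs with
  | nil => simp [PySem.Set.ofList, PySem.Set.empty]
  | cons x t ih =>
    rw [PySem.Set.ofList_cons]
    exact List.Sublist.cons₂ x (List.Sublist.trans (List.filter_sublist) ih)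

lemma sorted_ofList_of_pairwise (xs : List Int) (h : xs.Pairwise (· ≤ ·)) :
    PySem.List.sorted (PySem.Set.ofList xs) (fun x => x) false = PySem.Set.ofList xs := by
  exact PySem.List.sorted_eq_self_of_pairwise _ _ (List.Pairwise.sublist (ofList_sublist xs) h)

lemma discard_of_not_mem {α : Type} [BEq α] [LawfulBEq α] (s : PySem.Set α) (x : α) (h : x ∉ s) :
    PySem.Set.discard s x = s := by
  unfold PySem.Set.discard
  rw [List.filter_eq_self]
  intro a ha
  simp only [Bool.not_eq_eq_eq_not, Bool.not_true, beq_eq_false_iff_ne, ne_eq]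
  intro hax; exact h (hax ▸ ha)

lemma goPS_none_of_ne (es : List (Int × Int)) (last : Option Int)
    (h : ∀ e ∈ es, some e.2 ≠ last) : goPS last es = goPS none es := by
  cases es with
  | nil => rfl
  | cons e r =>
    obtain ⟨p, s⟩ := e
    have hs : some s ≠ last := h (p, s) (by simp)
    simp [goPS, hs]

-- G2: flatMap of first-match over the deduped (minus `last`) stop values = goPS
lemma g2 : ∀ (t : List (Int × Int)) (last : Option Int),
    (t.map (fun e : Int × Int => e.2)).Pairwise (· ≤ ·) →
    (∀ e ∈ t, ∀ v : Int, last = some v → v ≤ e.2) →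
    (match last with
     | none => PySem.Set.ofList (t.map (fun e : Int × Int => e.2))
     | some v => (PySem.Set.ofList (t.map (fun e : Int × Int => e.2))).discard v).flatMap
        (fun s => ((t.find? (fun e : Int × Int => e.2 == s)).map pvTri).toList)
      = (goPS last t).map pvTri := by
  intro t
  induction t with
  | nil =>
    intro last _ _
    cases last <;> simp [PySem.Set.ofList, PySem.Set.empty, PySem.Set.discard, goPS]
  | cons e r ih =>
    intro last hpw hlast
    obtain ⟨p, s⟩ := e
    simp only [List.map_cons] at hpw ⊢
    have hpw' : (r.map (fun e : Int × Int => e.2)).Pairwise (· ≤ ·) := hpw.tail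
    have hsle : ∀ e' ∈ r, s ≤ e'.2 := by
      intro e' he'
      exact List.rel_of_pairwise_cons hpw (List.mem_map_of_mem he')
    have hfind_tail : ∀ x : Int, x ≠ s →
        ((p, s) :: r).find? (fun e : Int × Int => e.2 == x) = r.find? (fun e : Int × Int => e.2 == x) := by
      intro x hx
      rw [List.find?_cons]
      rw [show (s == x) = false by simp [Ne.symm hx]]
    have hfind_head : ((p, s) :: r).find? (fun e : Int × Int => e.2 == s) = some (p, s) := by
      rw [List.find?_cons]; simp
    have hofl : PySem.Set.ofList (s :: r.map (fun e : Int × Int => e.2)) = s :: (PySem.Set.ofList (r.map (fun e : Int × Int => e.2))).discard s :=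
      PySem.Set.ofList_cons s _
    have hmem_discard : ∀ x ∈ (PySem.Set.ofList (r.map (fun e : Int × Int => e.2))).discard s, x ≠ s := by
      intro x hx
      unfold PySem.Set.discard at hx
      have := List.of_mem_filter hx
      simpa using this
    have hstep : ∀ x ∈ (PySem.Set.ofList (r.map (fun e : Int × Int => e.2))).discard s,
        ((((p, s) :: r).find? (fun e : Int × Int => e.2 == x)).map pvTri).toList
          = ((r.find? (fun e : Int × Int => e.2 == x)).map pvTri).toList := by
      intro x hx; rw [hfind_tail x (hmem_discard x hx)]
    cases last with
    | none =>
      rw [hofl]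
      rw [List.flatMap_cons]
      rw [hfind_head]
      have hrec := ih (some s) hpw' (by intro e' he' v hv; cases hv; exact hsle e' he')
      simp only at hrec
      rw [goPS]
      simp only [reduceCtorEq, if_false]
      rw [List.map_cons]
      simp only [Option.map_some, Option.toList_some, List.singleton_append]
      congr 1
      rw [← hrec]
      exact List.flatMap_congr hstep
    | some v =>
      dsimp only
      have hvs : ∀ e ∈ (p, s) :: r, v ≤ e.2 := fun e he => hlast e he v rfl
      by_cases hveq : v = s
      · subst hveq
        rw [hofl]
        have hdd : PySem.Set.discard (v :: PySem.Set.discard (PySem.Set.ofList (r.map (fun e : Int × Int => e.2))) v) v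
            = PySem.Set.discard (PySem.Set.ofList (r.map (fun e : Int × Int => e.2))) v := by
          unfold PySem.Set.discard
          rw [List.filter_cons]
          simp [List.filter_filter]
        rw [hdd]
        have hrec := ih (some v) hpw' (by intro e' he' w hw; cases hw; exact hsle e' he')
        simp only at hrec
        rw [goPS]
        simp only [if_true]
        rw [← hrec]
        exact List.flatMap_congr hstep
      · rw [hofl]
        have hvnm : v ∉ (s :: (PySem.Set.ofList (r.map (fun e : Int × Int => e.2))).discard s) := by
          intro hv
          rcases List.mem_cons.mp hv with h1 | h1
          · exact hveq h1
          · have : v ∈ PySem.Set.ofList (r.map (fun e : Int × Int => e.2)) := by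
              unfold PySem.Set.discard at h1
              exact List.mem_of_mem_filter h1
            rw [PySem.Set.mem_ofList] at this
            obtain ⟨e', he', heq⟩ := List.mem_map.mp this
            have h2 := hsle e' he'
            have h3 := hvs e' (List.mem_cons_of_mem _ he')
            have h4 := hvs (p, s) (by simp)
            simp only at h4
            omega
        rw [discard_of_not_mem _ _ hvnm]
        rw [List.flatMap_cons, hfind_head]
        have hrec := ih (some s) hpw' (by intro e' he' w hw; cases hw; exact hsle e' he')
        simp only at hrec
        rw [goPS]
        rw [if_neg (by simp [Ne.symm hveq])]
        rw [List.map_cons]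
        simp only [Option.map_some, Option.toList_some, List.singleton_append]
        congr 1
        rw [← hrec]
        exact List.flatMap_congr hstep

lemma enum_pairwise {α : Type} (l : List α) : ∀ (k : Int),
    (PySem.List.enumerate l k).Pairwise (fun a b => a.1 < b.1) := by
  induction l with
  | nil => intro k; simp [PySem.List.enumerate]
  | cons a t ih =>
    intro k
    rw [PySem.List.enumerate_cons]
    exact List.Pairwise.cons (fun x hx => by have := enum_ge t (k+1) x hx; omega) (ih (k+1))

lemma filterMap_if_pairwise {α : Type} (l : List α) (k : Int) (pred : α → Prop) [DecidablePred pred] :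
    ((PySem.List.enumerate l k).filterMap (fun ix => if pred ix.2 then some ix.1 else none)).Pairwise (· < ·) := by
  apply List.Pairwise.filterMap _ _ (enum_pairwise l k)
  intro a b hab x hx y hy
  by_cases ha : pred a.2 <;> by_cases hb : pred b.2 <;> simp [ha, hb] at hx hy
  omega

lemma filterMap_if_ge {α : Type} (l : List α) (k : Int) (pred : α → Prop) [DecidablePred pred] (x : Int)
    (hx : x ∈ (PySem.List.enumerate l k).filterMap (fun ix => if pred ix.2 then some ix.1 else none)) :
    k ≤ x := by
  obtain ⟨ix, hmem, hix⟩ := List.mem_filterMap.mp hx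
  by_cases h : pred ix.2
  · simp [h] at hix
    exact hix ▸ enum_ge l k ix hmem
  · simp [h] at hix

lemma find_stop_mono (stops : List Int) : ∀ (p q sp sq : Int), stops.Pairwise (· ≤ ·) → p ≤ q →
    stops.find? (fun s => decide (p < s)) = some sp →
    stops.find? (fun s => decide (q < s)) = some sq → sp ≤ sq := by
  induction stops with
  | nil => intro p q sp sq _ _ h; simp at h
  | cons a t ih =>
    intro p q sp sq hpw hpq hp hq
    by_cases hqa : q < a
    · have hpa : p < a := by omega
      rw [List.find?_cons_of_pos (by simpa using hpa)] at hp
      rw [List.find?_cons_of_pos (by simpa using hqa)] at hq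
      simp at hp hq; omega
    · rw [List.find?_cons_of_neg (by simpa using hqa)] at hq
      by_cases hpa : p < a
      · rw [List.find?_cons_of_pos (by simpa using hpa)] at hp
        simp at hp
        have hmem := List.mem_of_find?_eq_some hq
        have := List.rel_of_pairwise_cons hpw hmem
        omega
      · rw [List.find?_cons_of_neg (by simpa using hpa)] at hp
        exact ih p q sp sq hpw.tail hpq hp hq

lemma pairsPS_snd_mem (starts stops : List Int) (e : Int × Int) (he : e ∈ pairsPS starts stops) :
    e.2 ∈ stops := by
  obtain ⟨p, _, hp⟩ := List.mem_filterMap.mp he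
  cases hf : stops.find? (fun s => decide (p < s)) with
  | none => rw [hf] at hp; simp at hp
  | some s =>
    rw [hf] at hp
    simp at hp
    have := List.mem_of_find?_eq_some hf
    rw [← hp]; simpa using this

lemma pairsPS_snd_pairwise (starts stops : List Int)
    (hst : starts.Pairwise (· ≤ ·)) (hsp : stops.Pairwise (· ≤ ·)) :
    ((pairsPS starts stops).map (fun e : Int × Int => e.2)).Pairwise (· ≤ ·) := by
  rw [List.pairwise_map]
  apply List.Pairwise.filterMap _ _ hst
  intro p q hpq x hx y hy
  cases hfp : stops.find? (fun s => decide (p < s)) with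
  | none => rw [hfp] at hx; simp at hx
  | some sp =>
    cases hfq : stops.find? (fun s => decide (q < s)) with
    | none => rw [hfq] at hy; simp at hy
    | some sq =>
      rw [hfp] at hx; rw [hfq] at hy
      simp at hx hy
      rw [← hx, ← hy]
      exact find_stop_mono stops p q sp sq hsp hpq hfp hfq

lemma startsF_cons (c : String) (l : List String) (k : Int) :
    startsF k (c :: l) = (if c = "ATG" then [k] else []) ++ startsF (k + 1) l := by
  unfold startsF
  rw [PySem.List.enumerate_cons, List.filterMap_cons]
  by_cases h : c = "ATG" <;> simp [h]

lemma stopsF_cons (c : String) (l : List String) (k : Int) :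
    stopsF k (c :: l) = (if c ∈ pvStop then [k] else []) ++ stopsF (k + 1) l := by
  unfold stopsF
  rw [PySem.List.enumerate_cons, List.filterMap_cons]
  by_cases h : c ∈ pvStop <;> simp [h]

lemma startsF_ge (l : List String) (k : Int) (x : Int) (hx : x ∈ startsF k l) : k ≤ x :=
  filterMap_if_ge l k (fun c => c = "ATG") x hx

lemma stopsF_ge (l : List String) (k : Int) (x : Int) (hx : x ∈ stopsF k l) : k ≤ x :=
  filterMap_if_ge l k (fun c => c ∈ pvStop) x hx

lemma stop_ne_atg (c : String) (h : c ∈ pvStop) : c ≠ "ATG" := by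
  rcases List.mem_cons.mp h with rfl | h <;> try decide
  rcases List.mem_cons.mp h with rfl | h <;> try decide
  rcases List.mem_cons.mp h with rfl | h <;> try decide
  rcases List.mem_cons.mp h with rfl | h <;> try decide
  rcases List.mem_cons.mp h with rfl | h <;> try decide
  rcases List.mem_cons.mp h with rfl | h
  · decide
  · simp at h

lemma pairsPS_append (xs ys stops : List Int) :
    pairsPS (xs ++ ys) stops = pairsPS xs stops ++ pairsPS ys stops := by
  unfold pairsPS; rw [List.filterMap_append]

lemma pairsPS_nil_stops (xs : List Int) : pairsPS xs [] = [] := by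
  simp [pairsPS]

lemma pairsPS_skip (xs : List Int) (k : Int) (S : List Int)
    (h : ∀ x ∈ xs, ¬ x < k) : pairsPS xs (k :: S) = pairsPS xs S := by
  unfold pairsPS
  apply List.filterMap_congr
  intro p hp
  rw [List.find?_cons_of_neg (by simpa using h p hp)]

lemma main_g : ∀ (l : List String) (k : Int) (pending : Option Int),
    (∀ p : Int, pending = some p → p < k) →
    goPS none (pairsPS ((match pending with | some p => [p] | none => []) ++ startsF k l) (stopsF k l))
      = RPS pending k l := by
  intro l
  induction l with
  | nil =>
    intro k pending hp
    cases pending with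
    | none => simp [startsF, stopsF, PySem.List.enumerate, pairsPS, goPS, RPS]
    | some p => simp [startsF, stopsF, PySem.List.enumerate, pairsPS, goPS, RPS]
  | cons c l ih =>
    intro k pending hp
    rw [startsF_cons, stopsF_cons, RPS.eq_def]
    dsimp only
    by_cases hcs : c ∈ pvStop
    · rw [if_pos hcs, if_pos hcs]
      rw [if_neg (stop_ne_atg c hcs), List.nil_append]
      have hskip : ∀ x ∈ startsF (k+1) l, ¬ x < k := by
        intro x hx; have := startsF_ge l (k+1) x hx; omega
      cases pending with
      | none =>
        simp only [List.nil_append, List.singleton_append]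
        rw [pairsPS_skip _ k _ hskip]
        have := ih (k+1) none (by intro p hp'; cases hp')
        simpa using this
      | some p =>
        have hpk : p < k := hp p rfl
        simp only []
        rw [pairsPS_append]
        simp only [List.singleton_append]
        have h1 : pairsPS [p] (k :: stopsF (k+1) l) = [(p, k)] := by
          unfold pairsPS
          rw [List.filterMap_cons, List.find?_cons_of_pos (by simpa using hpk)]
          rfl
        rw [h1, pairsPS_skip _ k _ hskip]
        have hne : ∀ e ∈ pairsPS (startsF (k+1) l) (stopsF (k+1) l), some e.2 ≠ some k := by
          intro e he
          have := pairsPS_snd_mem _ _ e he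
          have := stopsF_ge l (k+1) e.2 this
          simp only [ne_eq, Option.some.injEq]
          omega
        have hrec := ih (k+1) none (by intro p hp'; cases hp')
        simp only [List.nil_append] at hrec
        rw [List.cons_append, List.nil_append]
        rw [goPS]
        rw [if_neg (by simp)]
        rw [goPS_none_of_ne _ _ hne, hrec]
    · rw [if_neg hcs, if_neg hcs, List.nil_append]
      by_cases hca : c = "ATG"
      · rw [if_pos hca, if_pos hca]
        cases pending with
        | none =>
          have hrec := ih (k+1) (some k) (by intro p hp'; cases hp'; omega)
          simp only [] at hrec ⊢
          simpa using hrec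
        | some p =>
          have hpk : p < k := hp p rfl
          simp only []
          have hrec := ih (k+1) (some p) (by intro q hq; cases hq; omega)
          simp only [] at hrec
          rw [← hrec]
          simp only [List.singleton_append]
          -- reduce (p :: k :: X) to (p :: X) under goPS
          cases hS : stopsF (k+1) l with
          | nil => rw [pairsPS_nil_stops, pairsPS_nil_stops]
          | cons s0 S'' =>
            have hs0 : k < s0 := by
              have := stopsF_ge l (k+1) s0 (by rw [hS]; simp)
              omega
            have hps0 : p < s0 := by omega
            have hchunk : ∀ (z : Int) (Y : List Int), z < s0 →
                pairsPS (z :: Y) (s0 :: S'') = (z, s0) :: pairsPS Y (s0 :: S'') := by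
              intro z Y hz
              unfold pairsPS
              rw [List.filterMap_cons, List.find?_cons_of_pos (by simpa using hz)]
              rfl
            rw [hchunk p _ hps0, hchunk k _ hs0, hchunk p _ hps0]
            simp [goPS]
      · rw [if_neg hca, if_neg hca, List.nil_append]
        have hrec := ih (k+1) pending (by intro p hp'; have := hp p hp'; omega)
        simpa using hrec

lemma foldB : ∀ (l : List String) (k : Int) (acc : List (List Int)) (pending : Option Int),
    ((PySem.List.enumerate l k).foldl
      (fun (st : List (List Int) × Option Int) ic =>
        if ic.2 ∈ pvStop then
          match st.2 with
          | some p => (st.1 ++ [[p, ic.1, ic.1 - p]], none)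
          | none => st
        else if ic.2 = "ATG" ∧ st.2 = none then (st.1, some ic.1)
        else st)
      (acc, pending)).1 = acc ++ (RPS pending k l).map pvTri := by
  intro l
  induction l with
  | nil => intro k acc pending; simp [PySem.List.enumerate, RPS]
  | cons c t ih =>
    intro k acc pending
    rw [PySem.List.enumerate_cons, List.foldl_cons, RPS.eq_def]
    dsimp only
    by_cases hcs : c ∈ pvStop
    · rw [if_pos hcs, if_pos hcs]
      cases pending with
      | none => simpa using ih (k+1) acc none
      | some p =>
        simp only []
        rw [ih (k+1) (acc ++ [[p, k, k - p]]) none]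
        simp [pvTri]
    · rw [if_neg hcs, if_neg hcs]
      by_cases hca : c = "ATG"
      · rw [if_pos hca]
        cases pending with
        | none =>
          rw [if_pos ⟨hca, rfl⟩]
          simpa using ih (k+1) acc (some k)
        | some p =>
          rw [if_neg (by simp)]
          simpa using ih (k+1) acc (some p)
      · rw [if_neg hca, if_neg (by simp [hca])]
        simpa using ih (k+1) acc pending

lemma final_eq (cl : List String) : orf_boundaries cl = orf_boundaries_alt cl := by
  have hB : orf_boundaries_alt cl = (RPS none 0 cl).map pvTri := by
    unfold orf_boundaries_alt
    exact foldB cl 0 [] none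
  set ps := pairsPS (startsF 0 cl) (stopsF 0 cl) with hps
  have hsnd : (ps.map (fun e : Int × Int => e.2)).Pairwise (· ≤ ·) := by
    apply pairsPS_snd_pairwise
    · exact (filterMap_if_pairwise cl 0 (fun c => c = "ATG")).imp le_of_lt
    · exact (filterMap_if_pairwise cl 0 (fun c => c ∈ pvStop)).imp le_of_lt
  have hA : orf_boundaries cl = (goPS none ps).map pvTri := by
    unfold orf_boundaries
    dsimp only
    have h0 : find_locs cl "ATG" = startsF 0 cl := rfl
    have h1 : find_all_locs cl pvStop = stopsF 0 cl := rfl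
    rw [h0, h1, fold1]
    simp only [List.nil_append]
    rw [sorted_ofList_of_pairwise _ hsnd]
    rw [phase3]
    have hg := g2 ps none hsnd (by intro e he v hv; cases hv)
    simpa using hg
  rw [hA, hB]
  have := main_g cl 0 none (by intro p hp; cases hp)
  simp only [List.nil_append] at this
  rw [← this]

-- ===== VERDICT (by name: the statement is the Claim_ definition above) =====
theorem orf_boundaries_spec : Claim_equal_orf_boundaries := by
  intro codon_list _ _
  unfold Spec_orf_boundaries
  exact final_eq codon_list
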